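-- pv_equiv track=rewrite | github.com/sxhfff/hunter-loop-analyzer | ui/app.py | format_card_count
-- ===== SOURCE A (Python) =====
-- from collections import Counter
--
-- def format_card_count(cards):
--     if not cards:
--         return "（空）"
--
--     counter = Counter(cards)
--     lines = []
--     for name in sorted(counter.keys()):
--         cnt = counter[name]
--         if cnt == 1:
--             lines.append(f"- {name}")
--         else:
--             lines.append(f"- {name} ×{cnt}")
--     return "\n".join(lines)
-- ===== SOURCE B (Python) =====
-- from collections import deque
--
-- def format_card_count(cards):
--     if not cards:
--         return "（空）"
--     lines = []
--     s = deque(sorted(cards))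
--     while s:
--         name = s.popleft()
--         run = 0
--         while s and s[0] == name:
--             s.popleft()
--             run += 1
--         cnt = run + 1
--         if cnt == 1:
--             lines.append(f"- {name}")
--         else:
--             lines.append(f"- {name} ×{cnt}")
--     return "\n".join(lines)
-- ===== Notes on version B (the rewrite author's own statement) =====
-- stated objective: alternative
-- what changed: Replaces the Counter-dictionary plus sorted-keys pass with a sort-then-scan: B sorts the list once and walks it emitting one line per run of equal adjacent names, taking each count from the run length instead of a frequency dict.
import Mathlib
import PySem

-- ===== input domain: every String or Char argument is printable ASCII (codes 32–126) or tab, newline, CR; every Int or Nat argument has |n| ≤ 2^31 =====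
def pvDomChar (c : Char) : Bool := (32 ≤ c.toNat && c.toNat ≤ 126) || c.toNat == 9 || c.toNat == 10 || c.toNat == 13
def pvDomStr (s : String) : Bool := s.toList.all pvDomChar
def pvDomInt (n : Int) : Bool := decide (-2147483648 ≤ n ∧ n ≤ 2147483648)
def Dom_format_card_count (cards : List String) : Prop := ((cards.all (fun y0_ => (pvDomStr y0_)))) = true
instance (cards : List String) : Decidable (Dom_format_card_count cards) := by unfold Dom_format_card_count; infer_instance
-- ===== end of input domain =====

-- B replaces A's Counter-then-sorted-keys pass by a sort-then-scan over runs of equal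
-- adjacent names (alternative decomposition; same asymptotic cost).

-- ===== PORT A =====
def format_card_count (cards : List String) : String :=
  if cards = [] then "（空）"
  else
    let counter := PySem.Dict.counter cards
    let lines : List String :=
      (PySem.List.sorted counter.keys (fun k => k)).foldl
        (fun lines name =>
          let cnt := counter.getD name 0
          if cnt = 1 then lines ++ ["- " ++ name]
          else lines ++ ["- " ++ name ++ " ×" ++ PySem.Int.toStr cnt]) []
    PySem.Str.join "\n" lines

-- ===== PORT B =====
-- Source B's inner 'while s and s[0] == name: s.popleft(); run += 1' loop:
-- pops the leading run of names equal to `name`, returning its length and the remaining deque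
def pvPopEq (name : String) : List String → Nat × List String
  | [] => (0, [])
  | y :: t => if y == name then let r := pvPopEq name t; (r.1 + 1, r.2) else (0, y :: t)

theorem pv_popEq_len_le (name : String) : ∀ (l : List String), (pvPopEq name l).2.length ≤ l.length := by
  intro l
  induction l with
  | nil => simp [pvPopEq]
  | cons y t ih =>
    by_cases h : (y == name) = true <;> simp [pvPopEq, h]
    omega

-- the outer 'while s:' loop of Source B: emit one line per run of equal names, then continue on the rest
def pvRunsB (s : List String) : List String :=
  match s with
  | [] => []
  | name :: rest =>
    let pr := pvPopEq name rest
    let cnt : Int := (pr.1 : Int) + 1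
    (if cnt = 1 then "- " ++ name
     else "- " ++ name ++ " ×" ++ PySem.Int.toStr cnt) :: pvRunsB pr.2
termination_by s.length
decreasing_by
  simp only [List.length_cons]
  exact Nat.lt_succ_of_le (pv_popEq_len_le name rest)

def format_card_count_alt (cards : List String) : String :=
  if cards = [] then "（空）"
  else PySem.Str.join "\n" (pvRunsB (PySem.List.sorted cards (fun x => x)))

-- ===== PRECONDITION & SPEC =====
def Spec_format_card_count (cards : List String) (out : String) : Prop := out = format_card_count_alt cards
instance (cards : List String) (out : String) : Decidable (Spec_format_card_count cards out) := by unfold Spec_format_card_count; infer_instance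

-- ===== CLAIM (what is proved, stated in full; the proofs are below) =====
def Claim_equal_format_card_count : Prop := ∀ (cards : List String), Dom_format_card_count cards → Spec_format_card_count cards (format_card_count cards)

-- ===== LEMMAS AND PROOFS =====

-- the common line format: "- name" or "- name ×cnt"
def pvFmt (name : String) (cnt : Int) : String :=
  if cnt = 1 then "- " ++ name else "- " ++ name ++ " ×" ++ PySem.Int.toStr cnt

theorem pv_ofList_sublist {α : Type} [BEq α] [LawfulBEq α] (xs : List α) :
    (PySem.Set.ofList xs).Sublist xs := by
  induction xs with
  | nil => simp [PySem.Set.ofList]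
  | cons x t ih =>
    rw [PySem.Set.ofList_cons]
    exact List.Sublist.cons₂ x ((List.filter_sublist).trans ih)

theorem pv_discard_of_not_mem {α : Type} [BEq α] [LawfulBEq α] {s : List α} {x : α}
    (h : x ∉ s) : PySem.Set.discard s x = s := by
  unfold PySem.Set.discard
  rw [List.filter_eq_self]
  intro a ha
  simp only [Bool.not_eq_eq_eq_not, Bool.not_true, beq_eq_false_iff_ne]
  exact fun hax => h (hax ▸ ha)

theorem pv_ofList_pairwise_lt (s : List String) (h : s.Pairwise (· ≤ ·)) :
    (PySem.Set.ofList s).Pairwise (· < ·) := by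
  have h1 : (PySem.Set.ofList s).Pairwise (· ≤ ·) := h.sublist (pv_ofList_sublist s)
  have h2 : (PySem.Set.ofList s).Pairwise (· ≠ ·) := by simpa [List.Nodup] using PySem.Set.nodup_ofList s
  exact (h1.and h2).imp (fun ⟨hle, hne⟩ => lt_of_le_of_ne hle hne)

theorem pv_ofList_run (name : String) (run' rest' : List String)
    (hrun : ∀ x ∈ run', x = name) (hn : name ∉ rest') :
    PySem.Set.ofList (name :: (run' ++ rest')) = name :: PySem.Set.ofList rest' := by
  induction run' with
  | nil =>
    rw [List.nil_append, PySem.Set.ofList_cons, pv_discard_of_not_mem]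
    simp [PySem.Set.mem_ofList, hn]
  | cons a t ih =>
    have ha : a = name := hrun a (List.mem_cons_self)
    subst ha
    have ih' := ih (fun x hx => hrun x (List.mem_cons_of_mem a hx))
    rw [PySem.Set.ofList_cons] at ih' ⊢
    have hd : PySem.Set.discard (PySem.Set.ofList (a :: t ++ rest')) a
        = PySem.Set.discard (PySem.Set.ofList (t ++ rest')) a := by
      rw [List.cons_append, PySem.Set.ofList_cons]
      unfold PySem.Set.discard
      simp [List.filter_filter]
    injection ih' with _ h2
    rw [hd, h2]

theorem pv_popEq_eq (name : String) : ∀ (l : List String),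
    pvPopEq name l = ((l.takeWhile (fun y => y == name)).length, l.dropWhile (fun y => y == name)) := by
  intro l
  induction l with
  | nil => rfl
  | cons y t ih =>
    by_cases h : (y == name) = true <;> simp [pvPopEq, List.takeWhile_cons, List.dropWhile_cons, h, ih]

theorem pv_lt_dropWhile (name : String) : ∀ (rest : List String),
    (name :: rest).Pairwise (· ≤ ·) →
    ∀ y ∈ rest.dropWhile (fun y => y == name), name < y := by
  intro rest
  induction rest with
  | nil => intro _ y hy; simp [List.dropWhile] at hy
  | cons a t ih =>
    intro h y hy
    by_cases hb : (a == name) = true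
    · rw [List.dropWhile_cons, if_pos hb] at hy
      have hsub : (name :: t).Pairwise (· ≤ ·) := h.sublist (by
        exact List.Sublist.cons₂ name (List.sublist_cons_self a t))
      exact ih hsub y hy
    · rw [List.dropWhile_cons, if_neg hb] at hy
      have hane : a ≠ name := by simpa using hb
      have hna : name < a :=
        lt_of_le_of_ne ((List.pairwise_cons.mp h).1 a List.mem_cons_self) (Ne.symm hane)
      rcases List.mem_cons.mp hy with rfl | hy'
      · exact hna
      · exact lt_of_lt_of_le hna
          ((List.pairwise_cons.mp (List.pairwise_cons.mp h).2).1 y hy')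

theorem pv_runs_eq : ∀ (s : List String), s.Pairwise (· ≤ ·) →
    pvRunsB s = (PySem.Set.ofList s).map (fun n => pvFmt n (s.count n : Int)) := by
  intro s
  induction s using pvRunsB.induct with
  | case1 => intro _; simp [pvRunsB, PySem.Set.ofList]
  | case2 name rest pr ih =>
    intro h
    -- names and facts about the run
    have hsplit : rest.takeWhile (fun y => y == name) ++ rest.dropWhile (fun y => y == name) = rest :=
      List.takeWhile_append_dropWhile
    set run' := rest.takeWhile (fun y => y == name) with hrun'
    set rest' := rest.dropWhile (fun y => y == name) with hrest'
    have hpr : pvPopEq name rest = (run'.length, rest') := pv_popEq_eq name rest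
    have hpr2 : pr = (run'.length, rest') := hpr
    rw [hpr2] at ih
    simp only [] at ih
    have hAll : ∀ x ∈ run', x = name := by
      intro x hx
      rw [hrun'] at hx
      have hb := List.mem_takeWhile_imp hx
      exact eq_of_beq hb
    have hgt : ∀ y ∈ rest', name < y := pv_lt_dropWhile name rest h
    have hnmem : name ∉ rest' := fun hmem => lt_irrefl name (hgt name hmem)
    -- counts
    have hcnt_run : run'.count name = run'.length := by
      rw [List.count_eq_length]
      intro b hb; exact (hAll b hb).symm
    have hc0 : rest'.count name = 0 := List.count_eq_zero.mpr hnmem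
    have hcount_name : ((name :: rest).count name : Int) = (run'.length : Int) + 1 := by
      rw [List.count_cons_self, ← hsplit, List.count_append, hcnt_run, hc0]
      push_cast; ring
    have hcount_tail : ∀ n ∈ rest', (name :: rest).count n = rest'.count n := by
      intro n hn
      have hne : n ≠ name := fun he => lt_irrefl name (he ▸ hgt n hn)
      have h1 : List.count n (name :: rest) = List.count n rest := by
        simp [Ne.symm hne]
      rw [h1, ← hsplit, List.count_append]
      have : run'.count n = 0 := by
        rw [List.count_eq_zero]
        intro hmem; exact hne (hAll n hmem)
      omega
    -- ofList structure
    have hofl : PySem.Set.ofList (name :: rest) = name :: PySem.Set.ofList rest' := by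
      conv_lhs => rw [← hsplit]
      exact pv_ofList_run name run' rest' hAll hnmem
    -- pairwise on rest'
    have hpw : rest'.Pairwise (· ≤ ·) :=
      (List.pairwise_cons.mp h).2.sublist (List.dropWhile_sublist _)
    -- assemble
    rw [pvRunsB, hpr]
    rw [ih hpw, hofl, List.map_cons]
    congr 1
    · show (if ((run'.length : Int) + 1 = 1) then "- " ++ name
            else "- " ++ name ++ " ×" ++ PySem.Int.toStr ((run'.length : Int) + 1))
        = pvFmt name ((name :: rest).count name : Int)
      rw [pvFmt, hcount_name]
    · apply List.map_congr_left
      intro n hn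
      have : n ∈ rest' := (PySem.Set.mem_ofList (xs := rest') (y := n)).mp hn
      rw [hcount_tail n this]

theorem pv_sorted_ofList_comm (cards : List String) :
    PySem.List.sorted (PySem.Set.ofList cards) (fun k => k)
      = PySem.Set.ofList (PySem.List.sorted cards (fun x => x)) := by
  apply PySem.List.sorted_eq_of_perm_of_pairwise_lt
  · apply (List.perm_ext_iff_of_nodup (PySem.Set.nodup_ofList _) (PySem.Set.nodup_ofList _)).mpr
    intro a
    simp only [PySem.Set.mem_ofList, PySem.List.mem_sorted]
  · exact pv_ofList_pairwise_lt _ (PySem.List.sorted_pairwise cards (fun x => x))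

-- ===== VERDICT (by name: the statement is the Claim_ definition above) =====
theorem format_card_count_spec : Claim_equal_format_card_count := by
  unfold Claim_equal_format_card_count Spec_format_card_count
  intro cards _
  simp only [format_card_count, format_card_count_alt]
  by_cases hnil : cards = []
  · rw [if_pos hnil, if_pos hnil]
  · rw [if_neg hnil, if_neg hnil]
    congr 1
    -- A's loop: append-one-line-per-name fold = map of the formatter over the sorted distinct names
    rw [PySem.Dict.keys_counter]
    rw [show (fun (lines : List String) (name : String) =>
          let cnt := (PySem.Dict.counter cards).getD name 0
          if cnt = 1 then lines ++ ["- " ++ name]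
          else lines ++ ["- " ++ name ++ " ×" ++ PySem.Int.toStr cnt])
        = (fun (lines : List String) (name : String) =>
            lines ++ [pvFmt name ((PySem.Dict.counter cards).getD name 0)]) from
      funext fun acc => funext fun name => by
        simp only [pvFmt]; split_ifs <;> rfl]
    rw [PySem.List.foldl_append_singleton_eq_map]
    simp only [List.nil_append, PySem.Dict.getD_counter]
    -- B's scan over runs of the sorted list
    rw [pv_runs_eq _ (PySem.List.sorted_pairwise cards (fun x => x))]
    rw [← pv_sorted_ofList_comm cards]
    apply List.map_congr_left
    intro n _
    rw [(PySem.List.sorted_perm cards (fun x => x) false).count_eq n]
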